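-- pv_equiv track=rewrite | github.com/hero-rq/Yoki | bounce.py | stabilize_echo
-- ===== SOURCE A (Python) =====
-- def stabilize_echo(word, bounce_count):
--     transmission = [word]
--
--     current_word = word
--
--     for _ in range(bounce_count):
--         # 1. Check if current_word is long enough to bounce (>= 3 letters)
--         if len(current_word) < 3:
--             break
--         # 2. Slice the word to remove the first and last characters
--         current_word = current_word[1:-1]
--         # 3. Add the new word to the 'transmission' list
--         transmission.append(current_word)
--         # 4. Break the loop if the word can't bounce anymore
--         pass
--
--     return "-".join(transmission)
-- ===== SOURCE B (Python) =====
-- def stabilize_echo(word, bounce_count):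
--     n = len(word)
--     s = max(0, min(bounce_count, (n - 1) // 2))
--     return "-".join(word[i:n - i] for i in range(s + 1))
-- ===== Notes on version B (the rewrite author's own statement) =====
-- stated objective: simpler
-- what changed: Replaced the repeatedly-mutated current_word accumulator and runtime length-check/break with a closed-form bounce count s = max(0, min(bounce_count, (len(word)-1)//2)) and direct slices word[i:n-i] of the original word joined in one expression.
import Mathlib
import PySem

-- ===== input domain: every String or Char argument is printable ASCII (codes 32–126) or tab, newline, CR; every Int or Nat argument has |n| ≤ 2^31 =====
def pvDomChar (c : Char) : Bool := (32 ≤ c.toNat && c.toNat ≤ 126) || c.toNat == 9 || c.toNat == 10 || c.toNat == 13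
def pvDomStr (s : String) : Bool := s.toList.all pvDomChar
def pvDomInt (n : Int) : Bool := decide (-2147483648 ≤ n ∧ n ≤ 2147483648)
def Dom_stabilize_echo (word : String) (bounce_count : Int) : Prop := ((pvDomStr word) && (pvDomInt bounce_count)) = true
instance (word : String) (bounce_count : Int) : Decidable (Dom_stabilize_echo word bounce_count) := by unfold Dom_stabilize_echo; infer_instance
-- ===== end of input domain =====

-- B replaces A's mutated current_word and runtime length-check/break by a closed-form
-- bounce count and direct slices of the original word (objective: simpler).

-- ===== PORT A =====
-- the 'for _ in range(bounce_count)' loop with its break, as structural recursion on the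
-- remaining iteration count; state = (current_word carried separately, transmission = acc)
def echoLoopA : Nat → List Char → List (List Char) → List (List Char)
  | 0, _, acc => acc
  | k + 1, cur, acc =>
    if cur.length < 3 then acc
    else
      let nxt := PySem.List.slice cur (some 1) (some (-1))   -- current_word[1:-1]
      echoLoopA k nxt (acc ++ [nxt])

def stabilize_echo (word : String) (bounce_count : Int) : String :=
  String.ofList (PySem.Chars.join ['-'] (echoLoopA bounce_count.toNat word.toList [word.toList]))

-- ===== PORT B =====
def stabilize_echo_alt (word : String) (bounce_count : Int) : String :=
  let w := word.toList
  let n : Int := (w.length : Int)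
  let s : Int := max 0 (min bounce_count (PySem.Int.floordiv (n - 1) 2))
  String.ofList (PySem.Chars.join ['-']
    ((PySem.List.pyRange 0 (s + 1) 1).map (fun i => PySem.List.slice w (some i) (some (n - i)))))

-- ===== PRECONDITION & SPEC =====
def Spec_stabilize_echo (word : String) (bounce_count : Int) (out : String) : Prop := out = stabilize_echo_alt word bounce_count
instance (word : String) (bounce_count : Int) (out : String) : Decidable (Spec_stabilize_echo word bounce_count out) := by unfold Spec_stabilize_echo; infer_instance

-- ===== CLAIM (what is proved, stated in full; the proofs are below) =====
def Claim_equal_stabilize_echo : Prop := ∀ (word : String) (bounce_count : Int), Dom_stabilize_echo word bounce_count → Spec_stabilize_echo word bounce_count (stabilize_echo word bounce_count)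

-- ===== LEMMAS AND PROOFS =====

-- one inward bounce
def strip (cs : List Char) : List Char := PySem.List.slice cs (some 1) (some (-1))

lemma strip_eq (cs : List Char) : strip cs = (cs.drop 1).take (cs.length - 2) := by
  rcases cs with _ | ⟨a, t⟩
  · rfl
  · simp [strip, PySem.List.slice, PySem.List.clampIdx]
    rw [if_neg (by omega : ¬ ((t.length : Int) < 0))]
    omega

lemma strip_take_drop (w : List Char) (j : Nat) (h : 2 * j + 3 ≤ w.length) :
    strip ((w.drop j).take (w.length - 2 * j)) = (w.drop (j + 1)).take (w.length - 2 * (j + 1)) := by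
  rw [strip_eq]
  have hlen : ((w.drop j).take (w.length - 2 * j)).length = w.length - 2 * j := by
    simp; omega
  rw [hlen, List.drop_take, List.take_take, List.drop_drop]
  congr 1
  omega

-- striping i times = the slice w[i : n-i], for i within the bounce budget
lemma iterate_strip (w : List Char) (i : Nat) (h : 2 * i + 1 ≤ w.length) :
    strip^[i] w = (w.drop i).take (w.length - 2 * i) := by
  induction i with
  | zero => simp
  | succ j ih =>
    rw [Function.iterate_succ_apply', ih (by omega), strip_take_drop w j (by omega)]

-- A's loop unrolled: exactly min k ((len-1)/2) bounces happen, each appending the next strip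
lemma echoLoopA_eq (k : Nat) : ∀ (cur : List Char) (acc : List (List Char)),
    echoLoopA k cur acc =
      acc ++ (List.range (min k ((cur.length - 1) / 2))).map (fun j => strip^[j + 1] cur) := by
  induction k with
  | zero => intro cur acc; simp [echoLoopA]
  | succ k ih =>
    intro cur acc
    rw [echoLoopA]
    by_cases h : cur.length < 3
    · have : (cur.length - 1) / 2 = 0 := by omega
      simp [h, this]
    · have hlen : (strip cur).length = cur.length - 2 := by
        rw [strip_eq]; simp; omega
      have hmin : min (k + 1) ((cur.length - 1) / 2) = min k (((strip cur).length - 1) / 2) + 1 := by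
        rw [hlen]; omega
      simp only [h, if_false]
      rw [show PySem.List.slice cur (some 1) (some (-1)) = strip cur from rfl,
        ih (strip cur) (acc ++ [strip cur]), hmin, List.range_succ_eq_map]
      simp [Function.comp_def, List.append_assoc, Function.iterate_succ_apply]

lemma bounce_nat (bc : Int) (L : Nat) :
    (max 0 (min bc (PySem.Int.floordiv ((L : Int) - 1) 2))).toNat = min bc.toNat ((L - 1) / 2) := by
  rw [PySem.Int.floordiv_eq_ediv_of_pos (by omega : (0 : Int) < 2)]
  omega

lemma pieces_eq (w : List Char) (bc : Int) :
    echoLoopA bc.toNat w [w] =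
      (PySem.List.pyRange 0 (max 0 (min bc (PySem.Int.floordiv ((w.length : Int) - 1) 2)) + 1) 1).map
        (fun i => PySem.List.slice w (some i) (some ((w.length : Int) - i))) := by
  set s : Int := max 0 (min bc (PySem.Int.floordiv ((w.length : Int) - 1) 2)) with hs
  set t : Nat := min bc.toNat ((w.length - 1) / 2) with ht
  have hs0 : 0 ≤ s := le_max_left _ _
  have hsn : s.toNat = t := bounce_nat bc w.length
  have hrange : PySem.List.pyRange 0 (s + 1) 1 = (List.range (t + 1)).map (fun k : Nat => (k : Int)) := by
    rw [PySem.List.pyRange_one]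
    have h1 : (s + 1 - 0).toNat = t + 1 := by omega
    rw [h1]
    simp
  rw [echoLoopA_eq, hrange, List.map_map]
  have hcut : min bc.toNat ((w.length - 1) / 2) = t := rfl
  rw [hcut, List.range_succ_eq_map]
  simp only [List.map_cons, List.map_map, Function.comp_def, Nat.cast_zero, Nat.succ_eq_add_one]
  rw [List.singleton_append]
  congr 1
  · rw [show ((w.length : Int) - 0) = ((w.length : Nat) : Int) by ring]
    simp [PySem.List.slice_to_natCast]
  · apply List.map_congr_left
    intro j hj
    have hjt : j < t := List.mem_range.mp hj
    have hb : 2 * (j + 1) + 1 ≤ w.length := by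
      have : j + 1 ≤ (w.length - 1) / 2 := by omega
      omega
    rw [show ((w.length : Int) - ((j + 1 : Nat) : Int)) = ((w.length - (j + 1) : Nat) : Int) by omega,
      PySem.List.slice_natCast, iterate_strip w (j + 1) hb]
    congr 1
    omega

theorem stabilize_echo_spec_aux (word : String) (bounce_count : Int) :
    stabilize_echo word bounce_count = stabilize_echo_alt word bounce_count := by
  unfold stabilize_echo stabilize_echo_alt
  exact congrArg (fun l => String.ofList (PySem.Chars.join ['-'] l)) (pieces_eq word.toList bounce_count)

-- ===== VERDICT (by name: the statement is the Claim_ definition above) =====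
theorem stabilize_echo_spec : Claim_equal_stabilize_echo := by
  intro word bounce_count _
  unfold Spec_stabilize_echo
  exact stabilize_echo_spec_aux word bounce_count
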